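-- pv_equiv track=rewrite | github.com/cke0devel/algorithmic_problems | leetcode/1525_Number_of_Good_Ways_to_Split_a_String.py | numSplits
-- ===== SOURCE A (Python) =====
-- def numSplits(s: str) -> int:
--     from collections import Counter
--
--     left, right = Counter(""), Counter(s)
--
--     ans = 0
--     for c in s:
--         left = left + Counter(c)
--         right = right - Counter(c)
--
--         if len(set(left.keys())) == len(set(right.keys())):
--             ans += 1
--
--     return ans
-- ===== SOURCE B (Python) =====
-- def numSplits(s: str) -> int:
--     # One pass each way with incremental distinct counts (no Counter rebuilding).
--     suffix = [0]
--     seen = set()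
--     for c in reversed(s):
--         seen.add(c)
--         suffix.append(len(seen))
--     suffix.reverse()  # suffix[i] = number of distinct chars of s[i:]
--     ans = 0
--     seen = set()
--     for i, c in enumerate(s):
--         seen.add(c)
--         if len(seen) == suffix[i + 1]:
--             ans += 1
--     return ans
-- ===== Notes on version B (the rewrite author's own statement) =====
-- stated objective: faster
-- what changed: Replaces per-character Counter addition/subtraction (rebuilding counters and key sets each step) by a precomputed suffix array of distinct counts plus an incremental prefix set, one O(1) update per character.
import Mathlib
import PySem

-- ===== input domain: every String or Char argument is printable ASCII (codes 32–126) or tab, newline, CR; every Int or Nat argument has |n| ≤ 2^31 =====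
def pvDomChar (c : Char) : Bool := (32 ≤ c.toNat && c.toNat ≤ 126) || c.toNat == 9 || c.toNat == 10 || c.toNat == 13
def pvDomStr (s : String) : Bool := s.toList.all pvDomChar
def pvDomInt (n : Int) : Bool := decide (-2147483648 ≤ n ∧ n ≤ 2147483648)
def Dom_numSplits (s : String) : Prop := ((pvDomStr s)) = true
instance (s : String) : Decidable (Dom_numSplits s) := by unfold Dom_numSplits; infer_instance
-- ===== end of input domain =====

-- B replaces A's per-character Counter rebuilding by a precomputed suffix array of
-- distinct counts plus an incremental prefix set (one O(1) update per character).

-- ===== PORT A =====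
-- 'left + Counter(c)': Counter.__add__ with a one-element counter, ported step for step:
-- every entry gets other[elem] (= 1 at c, else 0) added and is kept iff the new count is
-- positive; then c is appended with count 1 if it was not a key (other's count 1 > 0). Exact.
def counterAddOne (d : PySem.Dict Char Int) (c : Char) : PySem.Dict Char Int :=
  PySem.Dict.mk
    ((d.items.filterMap (fun q =>
        let n := q.2 + (if q.1 == c then 1 else 0)
        if 0 < n then some (q.1, n) else none)) ++
      (if d.contains c then [] else [(c, 1)]))

-- 'right - Counter(c)': Counter.__sub__ with a one-element counter, ported step for step:
-- every entry has other[elem] (= 1 at c, else 0) subtracted and is kept iff still positive;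
-- __sub__'s second loop adds nothing since other's only count is 1, not < 0. Exact.
def counterSubOne (d : PySem.Dict Char Int) (c : Char) : PySem.Dict Char Int :=
  PySem.Dict.mk
    (d.items.filterMap (fun q =>
        if q.1 == c then (if 0 < q.2 - 1 then some (q.1, q.2 - 1) else none) else some q))

def stepA (st : PySem.Dict Char Int × PySem.Dict Char Int × Int) (c : Char) :
    PySem.Dict Char Int × PySem.Dict Char Int × Int :=
  let left := counterAddOne st.1 c
  let right := counterSubOne st.2.1 c
  (left, right,
    if PySem.Set.len (PySem.Set.ofList left.keys) = PySem.Set.len (PySem.Set.ofList right.keys)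
    then st.2.2 + 1 else st.2.2)

def numSplits (s : String) : Int :=
  (s.toList.foldl stepA (PySem.Dict.empty, PySem.Dict.counter s.toList, 0)).2.2

-- ===== PORT B =====
def stepBsuf (st : List Int × PySem.Set Char) (c : Char) : List Int × PySem.Set Char :=
  let seen := PySem.Set.add st.2 c
  (st.1 ++ [PySem.Set.len seen], seen)

def suffixArr (cs : List Char) : List Int :=
  ((cs.reverse.foldl stepBsuf ([(0 : Int)], PySem.Set.empty)).1).reverse

def stepB (suffix : List Int) (st : Int × PySem.Set Char × Int) (c : Char) :
    Int × PySem.Set Char × Int :=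
  let seen := PySem.Set.add st.2.1 c
  (st.1 + 1, seen,
    if PySem.Set.len seen = PySem.List.pyGetD suffix (st.1 + 1) 0 then st.2.2 + 1 else st.2.2)

def numSplits_alt (s : String) : Int :=
  let cs := s.toList
  let suffix := suffixArr cs
  (cs.foldl (stepB suffix) (0, PySem.Set.empty, 0)).2.2

-- ===== PRECONDITION & SPEC =====
def Spec_numSplits (s : String) (out : Int) : Prop := out = numSplits_alt s
instance (s : String) (out : Int) : Decidable (Spec_numSplits s out) := by unfold Spec_numSplits; infer_instance

-- ===== CLAIM (what is proved, stated in full; the proofs are below) =====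
def Claim_equal_numSplits : Prop := ∀ (s : String), Dom_numSplits s → Spec_numSplits s (numSplits s)

-- ===== LEMMAS AND PROOFS =====

-- the common specification: number of good splits, split point walking left to right
def goodSpec : List Char → List Char → Int
  | _, [] => 0
  | p, c :: r =>
    (if ((PySem.Set.ofList (p ++ [c])).length : Int) = ((PySem.Set.ofList r).length : Int)
     then 1 else 0) + goodSpec (p ++ [c]) r

-- a Nodup list with the same members as l has the length of l's distinct set
theorem len_of_mem_iff (R l : List Char) (hnd : R.Nodup) (hm : ∀ k, k ∈ R ↔ k ∈ l) :
    R.length = (PySem.Set.ofList l).length := by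
  have h := (List.perm_ext_iff_of_nodup hnd (PySem.Set.nodup_ofList l)).mpr
    (by intro a; rw [hm a, PySem.Set.mem_ofList])
  exact h.length_eq

theorem filterMap_ite_none (l : List Char) (f : Char → Char × Int) (p : Char → Bool) :
    l.filterMap (fun k => if p k then none else some (f k)) = (l.filter (fun k => !p k)).map f := by
  induction l with
  | nil => rfl
  | cons x xs ih => by_cases h : p x <;> simp [h, ih]

theorem addOne_items (p : List Char) (c : Char) :
    (counterAddOne (PySem.Dict.mk ((PySem.Set.ofList p).map (fun k => (k, (p.count k : Int))))) c).items
      = (PySem.Set.ofList (p ++ [c])).map (fun k => (k, ((p ++ [c]).count k : Int))) := by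
  have hcont : (PySem.Dict.mk ((PySem.Set.ofList p).map (fun k => (k, (p.count k : Int))))).contains c
      = decide (c ∈ p) := by
    rw [PySem.Dict.contains_eq_decide_mem_keys]
    simp [PySem.Dict.keys, PySem.Set.mem_ofList]
  have hfm : ((PySem.Set.ofList p).map (fun k => (k, (p.count k : Int)))).filterMap (fun q =>
        let n := q.2 + (if q.1 == c then 1 else 0)
        if 0 < n then some (q.1, n) else none)
      = (PySem.Set.ofList p).map (fun k => (k, ((p ++ [c]).count k : Int))) := by
    rw [List.filterMap_map]
    rw [List.filterMap_congr (g := fun k => some (k, ((p ++ [c]).count k : Int))) ?_]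
    · exact congrFun List.filterMap_eq_map _
    · intro k hk
      have hkp : k ∈ p := by
        have := hk; simp [PySem.Set.mem_ofList] at this; exact this
      have hk1 : 1 ≤ p.count k := List.one_le_count_iff.mpr hkp
      by_cases h : k = c
      · subst h
        have h1 : (0:Int) < (p.count k : Int) + 1 := by positivity
        simp [h1, List.count_append]
      · have h1 : (0:Int) < (p.count k : Int) := by exact_mod_cast hk1
        have h2 : List.count k [c] = 0 := List.count_eq_zero.mpr (by simp [h])
        simp [h, List.count_append, h2, hkp]
  unfold counterAddOne
  simp only [hcont, hfm]
  by_cases h : c ∈ p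
  · simp only [h, decide_true, if_pos]
    have hc : c ∈ PySem.Set.ofList p := by simp [PySem.Set.mem_ofList, h]
    rw [PySem.Set.ofList_append_singleton, PySem.Set.add_of_mem hc]
    simp
  · simp only [h, decide_false, Bool.false_eq_true, if_false]
    have hc : c ∉ PySem.Set.ofList p := by simp [PySem.Set.mem_ofList, h]
    rw [PySem.Set.ofList_append_singleton, PySem.Set.add_of_not_mem hc]
    rw [List.map_append]
    congr 1
    simp [List.count_append, List.count_eq_zero_of_not_mem h]

theorem subOne_items (R : List Char) (r : List Char) (c : Char) (hnd : R.Nodup)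
    (hm : ∀ k, k ∈ R ↔ k ∈ c :: r) :
    ∃ R' : List Char, R'.Nodup ∧ (∀ k, k ∈ R' ↔ k ∈ r) ∧
      (counterSubOne (PySem.Dict.mk (R.map (fun k => (k, ((c :: r).count k : Int))))) c).items
        = R'.map (fun k => (k, (r.count k : Int))) := by
  unfold counterSubOne
  rw [List.filterMap_map]
  by_cases hc : c ∈ r
  · refine ⟨R, hnd, ?_, ?_⟩
    · intro k
      constructor
      · intro hk
        rcases List.mem_cons.mp ((hm k).mp hk) with h | h
        · exact h ▸ hc
        · exact h
      · intro hk; exact (hm k).mpr (List.mem_cons_of_mem _ hk)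
    · rw [List.filterMap_congr (g := fun k => some (k, (r.count k : Int))) ?_]
      · exact congrFun List.filterMap_eq_map _
      · intro k hk
        by_cases h : k = c
        · subst h
          have h1 : 1 ≤ r.count k := List.one_le_count_iff.mpr hc
          have h2 : (0:Int) < ((k :: r).count k : Int) - 1 := by
            rw [List.count_cons_self]; push_cast; omega
          simp [hc, List.count_cons_self]
        · have h' : ¬c = k := fun hh => h hh.symm
          simp [h, h', List.count_cons]
  · refine ⟨R.filter (fun k => !(k == c)), hnd.filter _, ?_, ?_⟩
    · intro k
      rw [List.mem_filter]
      constructor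
      · rintro ⟨hk, hne⟩
        rcases List.mem_cons.mp ((hm k).mp hk) with h | h
        · simp [h] at hne
        · exact h
      · intro hk
        refine ⟨(hm k).mpr (List.mem_cons_of_mem _ hk), ?_⟩
        simp only [Bool.not_eq_eq_eq_not, Bool.not_true, beq_eq_false_iff_ne, ne_eq]
        rintro rfl; exact hc hk
    · rw [List.filterMap_congr
          (g := fun k => if (k == c) then none else some (k, (r.count k : Int))) ?_]
      · exact filterMap_ite_none R _ _
      · intro k hk
        by_cases h : k = c
        · subst h
          have h0 : r.count k = 0 := List.count_eq_zero.mpr hc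
          simp [List.count_cons_self, h0]
        · have h' : ¬c = k := fun hh => h hh.symm
          simp [h, h', List.count_cons]

theorem A_loop (rest : List Char) : ∀ (p R : List Char) (ans : Int), R.Nodup →
    (∀ k, k ∈ R ↔ k ∈ rest) →
    (rest.foldl stepA
        (PySem.Dict.mk ((PySem.Set.ofList p).map (fun k => (k, (p.count k : Int)))),
         PySem.Dict.mk (R.map (fun k => (k, (rest.count k : Int)))), ans)).2.2
      = ans + goodSpec p rest := by
  induction rest with
  | nil => intro p R ans _ _; simp [goodSpec]
  | cons c r ih =>
    intro p R ans hnd hm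
    obtain ⟨R', hnd', hm', hitems⟩ := subOne_items R r c hnd hm
    have hleft : counterAddOne (PySem.Dict.mk ((PySem.Set.ofList p).map (fun k => (k, (p.count k : Int))))) c
        = PySem.Dict.mk ((PySem.Set.ofList (p ++ [c])).map (fun k => (k, ((p ++ [c]).count k : Int)))) :=
      PySem.Dict.ext (addOne_items p c)
    have hright : counterSubOne (PySem.Dict.mk (R.map (fun k => (k, ((c :: r).count k : Int))))) c
        = PySem.Dict.mk (R'.map (fun k => (k, (r.count k : Int)))) :=
      PySem.Dict.ext hitems
    have hkeysL : (PySem.Dict.mk ((PySem.Set.ofList (p ++ [c])).map (fun k => (k, ((p ++ [c]).count k : Int))))).keys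
        = PySem.Set.ofList (p ++ [c]) := by
      simp [PySem.Dict.keys, Function.comp_def]
    have hkeysR : (PySem.Dict.mk (R'.map (fun k => (k, (r.count k : Int))))).keys = R' := by
      simp [PySem.Dict.keys, Function.comp_def]
    have hcond : (PySem.Set.len (PySem.Set.ofList (PySem.Dict.mk ((PySem.Set.ofList (p ++ [c])).map (fun k => (k, ((p ++ [c]).count k : Int))))).keys)
          = PySem.Set.len (PySem.Set.ofList (PySem.Dict.mk (R'.map (fun k => (k, (r.count k : Int))))).keys))
        ↔ (((PySem.Set.ofList (p ++ [c])).length : Int) = ((PySem.Set.ofList r).length : Int)) := by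
      rw [hkeysL, hkeysR, PySem.Set.ofList_ofList, PySem.Set.ofList_eq_self_of_nodup R' hnd']
      simp only [PySem.Set.len]
      rw [len_of_mem_iff R' r hnd' hm']
    rw [List.foldl_cons]
    show (r.foldl stepA (stepA _ c)).2.2 = _
    rw [show stepA (PySem.Dict.mk ((PySem.Set.ofList p).map (fun k => (k, (p.count k : Int)))),
         PySem.Dict.mk (R.map (fun k => (k, ((c :: r).count k : Int)))), ans) c
       = (PySem.Dict.mk ((PySem.Set.ofList (p ++ [c])).map (fun k => (k, ((p ++ [c]).count k : Int)))),
          PySem.Dict.mk (R'.map (fun k => (k, (r.count k : Int)))),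
          ans + (if ((PySem.Set.ofList (p ++ [c])).length : Int) = ((PySem.Set.ofList r).length : Int) then 1 else 0)) from ?_]
    · rw [ih (p ++ [c]) R' _ hnd' hm']
      show _ = ans + goodSpec p (c :: r)
      rw [goodSpec]
      ring
    · unfold stepA
      simp only [hleft, hright]
      by_cases hcnd : ((PySem.Set.ofList (p ++ [c])).length : Int) = ((PySem.Set.ofList r).length : Int)
      · rw [if_pos (hcond.mpr hcnd), if_pos hcnd]
      · rw [if_neg (fun hh => hcnd (hcond.mp hh)), if_neg hcnd]
        simp

theorem map_range_reverse (n : Nat) (f : Nat → Int) :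
    ((List.range n).map f).reverse = (List.range n).map (fun j => f (n - 1 - j)) := by
  refine List.ext_getElem (by simp) ?_
  intro i h1 h2
  simp only [List.length_reverse, List.length_map, List.length_range] at h1 h2
  rw [List.getElem_reverse]
  simp only [List.length_map, List.length_range, List.getElem_map, List.getElem_range]

theorem suf_fold (ys : List Char) : ∀ (s0 : PySem.Set Char) (acc : List Int),
    (ys.foldl stepBsuf (acc, s0)).1
      = acc ++ (List.range ys.length).map
          (fun j => PySem.Set.len (PySem.Set.update s0 (ys.take (j+1)))) := by
  induction ys with
  | nil => intro s0 acc; simp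
  | cons c ys ih =>
    intro s0 acc
    rw [List.foldl_cons]
    show (ys.foldl stepBsuf (acc ++ [PySem.Set.len (PySem.Set.add s0 c)], PySem.Set.add s0 c)).1 = _
    rw [ih]
    simp only [List.length_cons, List.range_succ_eq_map, List.map_cons, List.map_map,
      List.take_succ_cons, List.take_zero, List.append_assoc, List.singleton_append]
    have e1 : PySem.Set.update s0 [c] = PySem.Set.add s0 c := by
      rw [PySem.Set.update_cons, PySem.Set.update_nil]
    rw [e1]
    congr 1


theorem suffixArr_eq (cs : List Char) :
    suffixArr cs
      = (List.range (cs.length + 1)).map (fun i => ((PySem.Set.ofList (cs.drop i)).length : Int)) := by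
  unfold suffixArr
  rw [suf_fold]
  have hlen : cs.reverse.length = cs.length := List.length_reverse
  have hmap : (List.range cs.reverse.length).map
        (fun j => PySem.Set.len (PySem.Set.update PySem.Set.empty (cs.reverse.take (j+1))))
      = (List.range cs.length).map
        (fun j => ((PySem.Set.ofList (cs.drop (cs.length - (j+1)))).length : Int)) := by
    rw [hlen]
    refine List.map_congr_left ?_
    intro j hj
    rw [List.mem_range] at hj
    rw [show PySem.Set.empty.update (List.take (j+1) cs.reverse)
          = PySem.Set.ofList (List.take (j+1) cs.reverse) from PySem.Set.update_empty _]
    have htake : cs.reverse.take (j+1) = (cs.drop (cs.length - (j+1))).reverse := by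
      rw [List.take_reverse]
    rw [htake]
    have := len_of_mem_iff (PySem.Set.ofList (cs.drop (cs.length - (j+1))).reverse)
      (cs.drop (cs.length - (j+1))) (PySem.Set.nodup_ofList _)
      (by intro k; rw [PySem.Set.mem_ofList, List.mem_reverse])
    simp only [PySem.Set.len]
    rw [this]
  rw [hmap]
  rw [List.reverse_eq_iff, List.range_succ, List.map_append, List.reverse_append,
    map_range_reverse]
  simp only [List.map_cons, List.map_nil, List.reverse_cons, List.reverse_nil,
    List.nil_append, List.singleton_append, List.drop_length]
  rw [show ((PySem.Set.ofList ([] : List Char)).length : Int) = 0 by rfl]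
  congr 1
  refine List.map_congr_left ?_
  intro j hj
  rw [List.mem_range] at hj
  have he : cs.length - (j+1) = cs.length - 1 - j := by omega
  rw [he]
  
/-
  · simp
  · intro i h1 h2
    simp only [List.length_append, List.length_map, List.length_range, List.length_cons] at h1 h2 ⊢
    rw [List.getElem_reverse]
    rw [List.getElem_map, List.getElem_range]
    simp only [List.length_append, List.length_map, List.length_range, List.length_cons,
      List.length_nil] at *
    by_cases hi : i = cs.length
    · subst hi
      have : (1 + cs.length) - 1 - cs.length = 0 := by omega
      rw [List.getElem_append_left (by simp; omega)]
      simp [this, List.drop_length]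
    · have hlt : i < cs.length := by omega
      rw [List.getElem_append_right (by simp; omega)]
      simp only [List.getElem_map, List.getElem_range]
      congr 2
      omega

-/
theorem suffix_get (cs : List Char) (i : Nat) (hi : i ≤ cs.length) :
    PySem.List.pyGetD (suffixArr cs) (i : Int) 0 = ((PySem.Set.ofList (cs.drop i)).length : Int) := by
  rw [PySem.List.pyGetD_natCast, suffixArr_eq]
  rw [List.getD_eq_getElem?_getD, List.getElem?_map, List.getElem?_range (by omega)]
  rfl

theorem B_loop (cs : List Char) (rest : List Char) : ∀ (p : List Char) (ans : Int),
    cs = p ++ rest →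
    (rest.foldl (stepB (suffixArr cs)) ((p.length : Int), PySem.Set.ofList p, ans)).2.2
      = ans + goodSpec p rest := by
  induction rest with
  | nil => intro p ans _; simp [goodSpec]
  | cons c r ih =>
    intro p ans hcs
    rw [List.foldl_cons]
    have hdrop : cs.drop (p.length + 1) = r := by
      rw [hcs, List.append_cons, show p.length + 1 = (p ++ [c]).length by simp,
        List.drop_left]
    have hle : p.length + 1 ≤ cs.length := by
      rw [hcs]; simp
    have hstep : stepB (suffixArr cs) ((p.length : Int), PySem.Set.ofList p, ans) c
        = (((p ++ [c]).length : Int), PySem.Set.ofList (p ++ [c]),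
           ans + (if ((PySem.Set.ofList (p ++ [c])).length : Int)
                    = ((PySem.Set.ofList r).length : Int) then 1 else 0)) := by
      unfold stepB
      have hseen : PySem.Set.add (PySem.Set.ofList p) c = PySem.Set.ofList (p ++ [c]) :=
        (PySem.Set.ofList_append_singleton p c).symm
      have hcast : ((p.length : Int) + 1) = ((p.length + 1 : Nat) : Int) := by push_cast; ring
      rw [hcast, suffix_get cs (p.length + 1) hle, hdrop]
      simp only [hseen, PySem.Set.len, List.length_append, List.length_cons, List.length_nil]
      have : ((p.length + 1 : Nat) : Int) = ((p ++ [c]).length : Int) := by simp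
      rw [this]
      by_cases hc : ((PySem.Set.ofList (p ++ [c])).length : Int) = ((PySem.Set.ofList r).length : Int)
      · rw [if_pos hc, if_pos hc]
      · rw [if_neg hc, if_neg hc]
        simp
    rw [hstep, ih (p ++ [c]) _ (by rw [hcs, List.append_cons])]
    rw [goodSpec]
    ring

theorem A_eq_spec (s : String) : numSplits s = goodSpec [] s.toList := by
  unfold numSplits
  have h1 : (PySem.Dict.empty : PySem.Dict Char Int)
      = PySem.Dict.mk ((PySem.Set.ofList ([] : List Char)).map
          (fun k => (k, (List.count k ([] : List Char) : Int)))) := rfl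
  have h2 : PySem.Dict.counter s.toList
      = PySem.Dict.mk ((PySem.Set.ofList s.toList).map
          (fun k => (k, (s.toList.count k : Int)))) :=
    PySem.Dict.ext (by rw [PySem.Dict.items_counter])
  rw [h1, h2, A_loop s.toList [] (PySem.Set.ofList s.toList) 0 (PySem.Set.nodup_ofList _)
    (by intro k; rw [PySem.Set.mem_ofList])]
  ring

theorem B_eq_spec (s : String) : numSplits_alt s = goodSpec [] s.toList := by
  show (s.toList.foldl (stepB (suffixArr s.toList)) (0, PySem.Set.empty, 0)).2.2 = _
  have h := B_loop s.toList s.toList [] 0 rfl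
  simp only [List.length_nil, Nat.cast_zero] at h
  rw [show (PySem.Set.empty : PySem.Set Char) = PySem.Set.ofList [] from rfl, h]
  ring

-- ===== VERDICT (by name: the statement is the Claim_ definition above) =====
theorem numSplits_spec : Claim_equal_numSplits := by
  intro s _
  unfold Spec_numSplits
  rw [A_eq_spec, B_eq_spec]
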